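-- pv_equiv track=rewrite | github.com/neerajvashistha/blogAggregation | entity_extraction.py | sort_return
-- ===== SOURCE A (Python) =====
-- def sort_return(originalString, alist):
--     astring = ' '.join(alist)
--     tokenastring = astring.split(' ')
--     tokenoriginal = originalString.lower().split(' ')
--     s=""
--     for i in tokenoriginal:
--         for j in tokenastring:
--             if i == j:
--                 s=s+j+" "
--     return s.strip()
-- ===== SOURCE B (Python) =====
-- def sort_return(originalString, alist):
--     counts = {}
--     for j in ' '.join(alist).split(' '):
--         counts[j] = counts.get(j, 0) + 1
--     out = []
--     for tok in originalString.lower().split(' '):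
--         out.extend([tok] * counts.get(tok, 0))
--     return ' '.join(out).strip()
-- ===== Notes on version B (the rewrite author's own statement) =====
-- stated objective: alternative
-- what changed: Replaces the nested scan (for each original token, scan all alist tokens and concatenate matches) with a dict of token counts built once plus one pass that replicates each original token by its count and joins at the end; it trades the inner scan for a count dictionary.
import Mathlib
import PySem

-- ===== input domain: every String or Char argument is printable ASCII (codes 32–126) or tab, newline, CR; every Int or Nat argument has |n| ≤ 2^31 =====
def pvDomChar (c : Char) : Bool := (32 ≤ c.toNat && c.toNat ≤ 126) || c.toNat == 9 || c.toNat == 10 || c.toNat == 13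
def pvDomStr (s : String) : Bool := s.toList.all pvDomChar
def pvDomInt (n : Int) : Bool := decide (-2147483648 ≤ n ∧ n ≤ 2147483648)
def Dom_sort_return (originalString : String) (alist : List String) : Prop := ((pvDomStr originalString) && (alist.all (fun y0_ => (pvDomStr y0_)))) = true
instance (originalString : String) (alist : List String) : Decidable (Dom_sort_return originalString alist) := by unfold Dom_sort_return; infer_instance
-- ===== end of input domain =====

-- B replaces A's nested scan with a token-count dictionary built once and a single
-- replicate-and-join pass (objective: alternative).


-- ===== PORT A =====
def sort_return (originalString : String) (alist : List String) : String :=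
  let astring := PySem.Str.join " " alist
  let tokenastring := (PySem.Str.split? astring " ").getD []   -- sep " " ≠ "": split? is always some
  let tokenoriginal := (PySem.Str.split? (PySem.Str.lower originalString) " ").getD []
  let s := tokenoriginal.foldl
    (fun s i => tokenastring.foldl (fun s j => if i == j then s ++ j ++ " " else s) s) ""
  PySem.Str.strip s

-- ===== PORT B =====
def sort_return_alt (originalString : String) (alist : List String) : String :=
  let tokenastring := (PySem.Str.split? (PySem.Str.join " " alist) " ").getD []
  let counts := tokenastring.foldl (fun d j => d.insert j (d.getD j 0 + 1))
    (PySem.Dict.empty : PySem.Dict String Int)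
  let out := ((PySem.Str.split? (PySem.Str.lower originalString) " ").getD []).foldl
    (fun acc tok => acc ++ List.replicate (counts.getD tok 0).toNat tok) []
  PySem.Str.strip (PySem.Str.join " " out)

-- ===== PRECONDITION & SPEC =====
def Spec_sort_return (originalString : String) (alist : List String) (out : String) : Prop := out = sort_return_alt originalString alist
instance (originalString : String) (alist : List String) (out : String) : Decidable (Spec_sort_return originalString alist out) := by unfold Spec_sort_return; infer_instance

-- ===== CLAIM (what is proved, stated in full; the proofs are below) =====
def Claim_equal_sort_return : Prop := ∀ (originalString : String) (alist : List String), Dom_sort_return originalString alist → Spec_sort_return originalString alist (sort_return originalString alist)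

-- ===== LEMMAS AND PROOFS =====

/-- The multiset of emitted tokens, in A's emission order. -/
def pvExpand (to_ ta : List String) : List String :=
  to_.flatMap (fun i => List.replicate (ta.count i) i)

lemma pv_space : (" " : String).toList = [' '] := rfl

lemma pv_inner (ta : List String) (i : String) : ∀ (s : String),
    (ta.foldl (fun s j => if i == j then s ++ j ++ " " else s) s).toList
      = s.toList ++ (List.replicate (ta.count i) i).flatMap (fun t => t.toList ++ [' ']) := by
  induction ta with
  | nil => intro s; simp
  | cons j ta ih =>
    intro s
    rw [List.foldl_cons]
    by_cases h : i = j
    · subst h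
      rw [if_pos (by simp), ih]
      simp [List.replicate_succ, pv_space]
    · rw [if_neg (by simp [h]), ih]
      have hb' : (j == i) = false := by simp [Ne.symm h]
      simp [List.count_cons, hb']

lemma pv_outer (to_ ta : List String) : ∀ (s : String),
    (to_.foldl (fun s i => ta.foldl (fun s j => if i == j then s ++ j ++ " " else s) s) s).toList
      = s.toList ++ (pvExpand to_ ta).flatMap (fun t => t.toList ++ [' ']) := by
  induction to_ with
  | nil => intro s; simp [pvExpand]
  | cons i to_ ih =>
    intro s
    rw [List.foldl_cons, ih, pv_inner]
    simp [pvExpand]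

lemma pv_out (to_ ta : List String) :
    to_.foldl (fun acc tok => acc ++ List.replicate ((PySem.Dict.counter ta).getD tok 0).toNat tok) []
      = pvExpand to_ ta := by
  rw [PySem.List.foldl_append_eq_flatMap]
  simp [pvExpand, PySem.Dict.getD_counter]

lemma pv_join (ps : List (List Char)) (h : ps ≠ []) :
    ps.flatMap (fun t => t ++ [' ']) = PySem.Chars.join [' '] ps ++ [' '] := by
  induction ps with
  | nil => cases h rfl
  | cons x ps ih =>
    cases ps with
    | nil => simp [PySem.Chars.join, List.intercalate]
    | cons y ps' =>
      rw [List.flatMap_cons, ih (by simp), PySem.Chars.join_cons_cons]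
      simp

lemma pv_rstrip_space (xs : List Char) :
    PySem.Chars.rstrip (xs ++ [' ']) = PySem.Chars.rstrip xs := by
  simp [PySem.Chars.rstrip, List.reverse_append,
    show PySem.Chars.isspace ' ' = true from rfl]

lemma pv_strip_space (xs : List Char) :
    PySem.Chars.strip (xs ++ [' ']) = PySem.Chars.strip xs := by
  unfold PySem.Chars.strip PySem.Chars.lstrip
  rw [List.dropWhile_append]
  by_cases h : (List.dropWhile PySem.Chars.isspace xs).isEmpty
  · simp only [h, if_true]
    rw [List.isEmpty_iff] at h
    rw [h]
    simp [show PySem.Chars.isspace ' ' = true from rfl]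
  · simp only [h]
    exact pv_rstrip_space _

-- ===== VERDICT (by name: the statement is the Claim_ definition above) =====
theorem sort_return_spec : Claim_equal_sort_return := by
  intro o alist _
  show sort_return o alist = sort_return_alt o alist
  simp only [sort_return, sort_return_alt,
    PySem.Dict.foldl_insert_getD_add_one_eq_counter, pv_out, PySem.Str.strip]
  apply congrArg String.ofList
  rw [pv_outer, PySem.Str.toList_join, pv_space]
  by_cases hE : pvExpand ((PySem.Str.split? (PySem.Str.lower o) " ").getD [])
      ((PySem.Str.split? (PySem.Str.join " " alist) " ").getD []) = []
  · simp [hE, PySem.Chars.join, List.intercalate]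
  · have hmap : ∀ (L : List String), L.flatMap (fun t => t.toList ++ [' '])
        = (L.map String.toList).flatMap (fun t => t ++ [' ']) := by
      intro L; simp [List.flatMap_map]
    rw [hmap, pv_join _ (by simpa using hE)]
    simp [pv_strip_space]
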